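-- pv_equiv track=rewrite | github.com/mannymny/sealium-services | transcription-service/transcription_service/infrastructure/pdf/reportlab_adapter.py | _iter_clean_transcript_lines
-- ===== SOURCE A (Python) =====
-- from typing import Iterable
--
-- def _iter_clean_transcript_lines(transcript_lines: Iterable[str]) -> Iterable[str]:
--     last_was_blank = False
--     for raw in transcript_lines:
--         s = (raw or "").rstrip("\n")
--         if s.strip().lower().startswith("duration:"):
--             continue
--
--         is_blank = (s.strip() == "")
--         if is_blank:
--             if last_was_blank:
--                 continue
--             last_was_blank = True
--             yield ""
--         else:
--             last_was_blank = False
--             yield s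
-- ===== SOURCE B (Python) =====
-- from typing import Iterable
-- from itertools import groupby
--
--
-- def _iter_clean_transcript_lines(transcript_lines: Iterable[str]) -> Iterable[str]:
--     def normalized():
--         for raw in transcript_lines:
--             s = (raw or "").rstrip("\n")
--             if s.strip().lower().startswith("duration:"):
--                 continue
--             yield "" if s.strip() == "" else s
--
--     for is_blank, group in groupby(normalized(), key=lambda v: v == ""):
--         if is_blank:
--             yield ""
--         else:
--             yield from group
-- ===== Notes on version B (the rewrite author's own statement) =====
-- stated objective: idiomatic
-- what changed: Replaces the stateful last_was_blank flag loop with a two-stage pipeline: a normalizing/filtering generator followed by itertools.groupby run-collapsing that emits one '' per blank run.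
import Mathlib
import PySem

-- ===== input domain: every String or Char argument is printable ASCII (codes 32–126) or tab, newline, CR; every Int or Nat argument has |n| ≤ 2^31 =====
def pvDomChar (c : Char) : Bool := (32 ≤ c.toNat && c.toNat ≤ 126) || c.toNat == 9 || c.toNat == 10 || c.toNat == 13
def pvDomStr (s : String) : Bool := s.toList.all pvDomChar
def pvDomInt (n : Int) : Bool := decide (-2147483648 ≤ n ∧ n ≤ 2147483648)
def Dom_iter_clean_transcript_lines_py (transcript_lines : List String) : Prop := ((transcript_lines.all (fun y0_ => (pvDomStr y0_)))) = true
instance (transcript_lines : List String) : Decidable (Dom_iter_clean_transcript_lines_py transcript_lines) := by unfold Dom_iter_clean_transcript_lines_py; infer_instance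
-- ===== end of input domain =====

-- B replaces A's stateful last_was_blank flag loop with a normalize/filter stage followed by
-- run-grouping that emits one "" per blank run (idiomatic pipeline); return values proved equal.

-- shared string helper: Python's  s.rstrip("\n")  — drop trailing '\n' code points (exact; PySem has
-- no chars-argument rstrip, so ported by hand on the char list)
def pvRstripNl (s : String) : String :=
  String.mk ((s.toList.reverse.dropWhile (fun c => c == '\n')).reverse)

-- ===== PORT A =====
-- the loop body's running state is the Bool last_was_blank; yields accumulate in the result list
def iterCleanA (lines : List String) (last_was_blank : Bool) : List String :=
  match lines with
  | [] => []
  | raw :: rest =>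
    let s := pvRstripNl (if raw = "" then "" else raw)   -- (raw or "").rstrip("\n")
    if PySem.Str.startswith (PySem.Str.lower (PySem.Str.strip s)) "duration:" then
      iterCleanA rest last_was_blank
    else if PySem.Str.strip s = "" then
      if last_was_blank then iterCleanA rest last_was_blank
      else "" :: iterCleanA rest true
    else s :: iterCleanA rest false

def iter_clean_transcript_lines_py (transcript_lines : List String) : List String :=
  iterCleanA transcript_lines false

-- ===== PORT B =====
-- stage one: the normalized() generator — filter duration lines, map to "" or s
def pvNormalize? (raw : String) : Option String :=
  let s := pvRstripNl (if raw = "" then "" else raw)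
  if PySem.Str.startswith (PySem.Str.lower (PySem.Str.strip s)) "duration:" then none
  else some (if PySem.Str.strip s = "" then "" else s)

-- stage two: groupby on (v == ""): a blank run yields a single "", a non-blank run is passed through
def pvCollapseRuns (l : List String) : List String :=
  match l with
  | [] => []
  | x :: rest =>
    if x == "" then "" :: pvCollapseRuns (rest.dropWhile (· == ""))
    else x :: pvCollapseRuns rest
termination_by l.length
decreasing_by
  · exact Nat.lt_succ_of_le (List.length_dropWhile_le _ _)
  · simp

def iter_clean_transcript_lines_py_alt (transcript_lines : List String) : List String :=
  pvCollapseRuns (transcript_lines.filterMap pvNormalize?)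

-- ===== PRECONDITION & SPEC =====
def Spec_iter_clean_transcript_lines_py (transcript_lines : List String) (out : List String) : Prop := out = iter_clean_transcript_lines_py_alt transcript_lines
instance (transcript_lines : List String) (out : List String) : Decidable (Spec_iter_clean_transcript_lines_py transcript_lines out) := by unfold Spec_iter_clean_transcript_lines_py; infer_instance

-- ===== CLAIM (what is proved, stated in full; the proofs are below) =====
def Claim_equal_iter_clean_transcript_lines_py : Prop := ∀ (transcript_lines : List String), Dom_iter_clean_transcript_lines_py transcript_lines → Spec_iter_clean_transcript_lines_py transcript_lines (iter_clean_transcript_lines_py transcript_lines)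

-- ===== LEMMAS AND PROOFS =====

-- run-collapsing with an explicit 'inside a blank run' flag: the bridge between the two shapes
def pvCollapseSt (b : Bool) (l : List String) : List String :=
  match l with
  | [] => []
  | x :: rest =>
    if x = "" then (if b then pvCollapseSt b rest else "" :: pvCollapseSt true rest)
    else x :: pvCollapseSt false rest

lemma pvCollapseRuns_nil : pvCollapseRuns [] = [] := by
  rw [pvCollapseRuns.eq_def]

lemma pvCollapseRuns_cons_blank (rest : List String) :
    pvCollapseRuns ("" :: rest) = "" :: pvCollapseRuns (rest.dropWhile (· == "")) := by
  rw [pvCollapseRuns.eq_def]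
  simp

lemma pvCollapseRuns_cons (x : String) (rest : List String) (h : x ≠ "") :
    pvCollapseRuns (x :: rest) = x :: pvCollapseRuns rest := by
  rw [pvCollapseRuns.eq_def]
  simp [h]

lemma iterCleanA_eq_collapseSt (lines : List String) (b : Bool) :
    iterCleanA lines b = pvCollapseSt b (lines.filterMap pvNormalize?) := by
  induction lines generalizing b with
  | nil => simp [iterCleanA, pvCollapseSt]
  | cons raw rest ih =>
    by_cases hd : PySem.Str.startswith
        (PySem.Str.lower (PySem.Str.strip (pvRstripNl (if raw = "" then "" else raw)))) "duration:" = true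
    · have hn : pvNormalize? raw = none := by
        simp only [pvNormalize?]; rw [if_pos hd]
      rw [List.filterMap_cons_none hn]
      simp only [iterCleanA]
      rw [if_pos hd]
      exact ih b
    · by_cases hb : PySem.Str.strip (pvRstripNl (if raw = "" then "" else raw)) = ""
      · have hn : pvNormalize? raw = some "" := by
          simp only [pvNormalize?]; rw [if_neg hd, if_pos hb]
        rw [List.filterMap_cons_some hn]
        simp only [iterCleanA]
        rw [if_neg hd, if_pos hb]
        cases b <;> simp [pvCollapseSt, ih]
      · have hn : pvNormalize? raw = some (pvRstripNl (if raw = "" then "" else raw)) := by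
          simp only [pvNormalize?]; rw [if_neg hd, if_neg hb]
        rw [List.filterMap_cons_some hn]
        simp only [iterCleanA]
        rw [if_neg hd, if_neg hb]
        have hs : pvRstripNl (if raw = "" then "" else raw) ≠ "" := by
          intro h
          exact hb (by rw [h]; decide)
        simp [pvCollapseSt, hs, ih]

lemma collapseSt_eq_collapse (l : List String) :
    pvCollapseSt false l = pvCollapseRuns l ∧
    pvCollapseSt true l = pvCollapseRuns (l.dropWhile (· == "")) := by
  induction l with
  | nil => simp [pvCollapseSt, pvCollapseRuns_nil]
  | cons x rest ih =>
    by_cases hx : x = ""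
    · subst hx
      constructor
      · rw [pvCollapseRuns_cons_blank]
        simp [pvCollapseSt, ih.2]
      · simp [pvCollapseSt, ih.2]
    · constructor
      · rw [pvCollapseRuns_cons x rest hx]
        simp [pvCollapseSt, hx, ih.1]
      · rw [List.dropWhile_cons, if_neg (by simpa using hx), pvCollapseRuns_cons x rest hx]
        simp [pvCollapseSt, hx, ih.1]

-- ===== VERDICT (by name: the statement is the Claim_ definition above) =====
theorem iter_clean_transcript_lines_py_spec : Claim_equal_iter_clean_transcript_lines_py := by
  intro transcript_lines _
  show iter_clean_transcript_lines_py transcript_lines = iter_clean_transcript_lines_py_alt transcript_lines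
  rw [iter_clean_transcript_lines_py, iter_clean_transcript_lines_py_alt,
    iterCleanA_eq_collapseSt, (collapseSt_eq_collapse _).1]
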